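-- pv_equiv track=rewrite | github.com/bio-informatician/ICTV | merge_ictv.py | merge_vmr_entries
-- ===== SOURCE A (Python) =====
-- def merge_vmr_entries(vmr_entries):
--     merged = {}
--     if not vmr_entries:
--         return merged
--
--     keys = vmr_entries[0].keys()
--     for key in keys:
--         values = [entry[key] for entry in vmr_entries if key in entry and entry[key]]
--
--         # Deduplicate and concatenate string values with ";"
--         if all(isinstance(v, str) for v in values):
--             unique_vals = sorted(set(values))
--             merged[key] = "; ".join(unique_vals)
--         else:
--             # Assume other types can be overridden or handled case-by-case
--             merged[key] = values[0]
--
--     return merged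
-- ===== SOURCE B (Python) =====
-- def merge_vmr_entries(vmr_entries):
--     if not vmr_entries:
--         return {}
--     # one pass: build a per-key list of truthy values, keys fixed by the first entry
--     table = {k: [] for k in vmr_entries[0]}
--     for entry in vmr_entries:
--         for k, v in entry.items():
--             if v and k in table:
--                 table[k].append(v)
--     # finalize: dedup, sort and join each key's collected strings
--     return {k: "; ".join(sorted(set(vals))) for k, vals in table.items()}
-- ===== Notes on version B (the rewrite author's own statement) =====
-- stated objective: alternative
-- what changed: Replaces A's per-key repeated scan over all entries (column order) with a single row-order pass that appends each entry's truthy values into a pre-keyed table, followed by a separate finalize pass that dedups/sorts/joins each key's list.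
import Mathlib
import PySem

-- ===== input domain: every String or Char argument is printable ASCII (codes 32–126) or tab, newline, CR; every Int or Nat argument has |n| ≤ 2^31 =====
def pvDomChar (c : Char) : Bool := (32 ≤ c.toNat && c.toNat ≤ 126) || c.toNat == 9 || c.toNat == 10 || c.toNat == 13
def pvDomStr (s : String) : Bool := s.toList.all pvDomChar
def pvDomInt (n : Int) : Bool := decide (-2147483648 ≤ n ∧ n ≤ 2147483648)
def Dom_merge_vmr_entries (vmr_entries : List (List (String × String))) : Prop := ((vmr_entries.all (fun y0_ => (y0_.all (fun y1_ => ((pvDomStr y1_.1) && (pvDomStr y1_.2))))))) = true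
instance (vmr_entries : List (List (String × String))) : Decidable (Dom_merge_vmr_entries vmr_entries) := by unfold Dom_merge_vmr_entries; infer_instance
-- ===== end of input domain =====

-- B replaces A's per-key rescans of all entries by one row-order pass into a pre-keyed table plus a finalize pass (objective: alternative decomposition, same results).

-- ===== PORT A =====
-- A per key scans all entries for truthy values, dedups+sorts+joins them.
-- (Python's `all(isinstance(v, str) …)` branch is always taken here: values are strings by type.)
def merge_vmr_entries (vmr_entries : List (List (String × String))) : List (String × String) :=
  match vmr_entries with
  | [] => []
  | first :: _ =>
    let entries := vmr_entries.map (fun e => PySem.Dict.ofList e)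
    let keys := (PySem.Dict.ofList first).keys
    let merged := keys.foldl (fun merged key =>
      let values := entries.foldl (fun acc entry =>
        if entry.contains key && !(entry.getD key "" == "") then acc ++ [entry.getD key ""]
        else acc) []
      let unique_vals := PySem.List.sorted (PySem.Set.ofList values) (fun v => v) false
      merged.insert key (PySem.Str.join "; " unique_vals)) PySem.Dict.empty
    merged.items

-- ===== PORT B =====
-- B: table keyed by the first entry's keys; one pass over entries appending each truthy value; finalize pass dedups+sorts+joins.
def merge_vmr_entries_alt (vmr_entries : List (List (String × String))) : List (String × String) :=
  match vmr_entries with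
  | [] => []
  | first :: _ =>
    let entries := vmr_entries.map (fun e => PySem.Dict.ofList e)
    let table0 := (PySem.Dict.ofList first).keys.foldl
      (fun t k => t.insert k ([] : List String)) PySem.Dict.empty
    let table := entries.foldl (fun t entry =>
      entry.items.foldl (fun t p =>
        if !(p.2 == "") && t.contains p.1 then t.modify p.1 [] (fun vs => vs ++ [p.2]) else t) t)
      table0
    let res := table.items.foldl (fun m p =>
      m.insert p.1 (PySem.Str.join "; "
        (PySem.List.sorted (PySem.Set.ofList p.2) (fun v => v) false))) PySem.Dict.empty
    res.items

-- ===== PRECONDITION & SPEC =====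
def Spec_merge_vmr_entries (vmr_entries : List (List (String × String))) (out : List (String × String)) : Prop := out = merge_vmr_entries_alt vmr_entries
instance (vmr_entries : List (List (String × String))) (out : List (String × String)) : Decidable (Spec_merge_vmr_entries vmr_entries out) := by unfold Spec_merge_vmr_entries; infer_instance

-- ===== CLAIM (what is proved, stated in full; the proofs are below) =====
def Claim_equal_merge_vmr_entries : Prop := ∀ (vmr_entries : List (List (String × String))), Dom_merge_vmr_entries vmr_entries → Spec_merge_vmr_entries vmr_entries (merge_vmr_entries vmr_entries)

-- ===== LEMMAS AND PROOFS =====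

-- B's inner per-entry loop step
def pvIStep (t : PySem.Dict String (List String)) (p : String × String) : PySem.Dict String (List String) :=
  if !(p.2 == "") && t.contains p.1 then t.modify p.1 [] (fun vs => vs ++ [p.2]) else t

-- the inner loop never changes the key set
lemma pvIStep_keys (L : List (String × String)) :
    ∀ t : PySem.Dict String (List String), (L.foldl pvIStep t).keys = t.keys := by
  induction L with
  | nil => intro t; rfl
  | cons p L ih =>
    intro t
    simp only [List.foldl_cons, ih]
    unfold pvIStep
    split
    · next h =>
      have hc : t.contains p.1 = true := by
        rcases Bool.and_eq_true_iff.mp h with ⟨_, h2⟩; exact h2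
      rw [PySem.Dict.keys_modify, PySem.Dict.keys_insert_of_contains _ _ hc]
    · rfl

lemma pvIStep_contains (L : List (String × String)) (t : PySem.Dict String (List String)) (j : String) :
    (L.foldl pvIStep t).contains j = t.contains j := by
  rw [PySem.Dict.contains_eq_decide_mem_keys, PySem.Dict.contains_eq_decide_mem_keys, pvIStep_keys]

-- value collected at key k by the inner loop
lemma pvIStep_getD (L : List (String × String)) :
    ∀ t : PySem.Dict String (List String), ∀ k : String, t.contains k = true →
    (L.foldl pvIStep t).getD k [] =
      t.getD k [] ++ (L.filter (fun p => p.1 == k && !(p.2 == ""))).map Prod.snd := by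
  induction L with
  | nil => intro t k _; simp
  | cons p L ih =>
    intro t k hk
    simp only [List.foldl_cons, List.filter_cons]
    by_cases hg : (!(p.2 == "") && t.contains p.1) = true
    · have t' : pvIStep t p = t.modify p.1 [] (fun vs => vs ++ [p.2]) := by
        unfold pvIStep; rw [if_pos hg]
      have hc' : (pvIStep t p).contains k = true := by
        rw [t', PySem.Dict.contains_modify]; simp [hk]
      rw [t'] at hc' ⊢
      rw [ih _ k hc', PySem.Dict.getD_modify]
      rcases Bool.and_eq_true_iff.mp hg with ⟨hv, _⟩
      by_cases hkk : k = p.1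
      · subst hkk
        simp [hv, List.append_assoc]
      · have : (p.1 == k) = false := by simp [Ne.symm hkk]
        simp [this, hkk]
    · have t' : pvIStep t p = t := by unfold pvIStep; rw [if_neg hg]
      rw [t', ih _ k hk]
      have : (p.1 == k && !(p.2 == "")) = false := by
        rcases Bool.and_eq_false_iff.mp (Bool.eq_false_iff.mpr hg ▸ rfl : (!(p.2 == "") && t.contains p.1) = false) with h1 | h2
        · simp at h1
          simp [h1]
        · have : p.1 ≠ k := fun he => by rw [he, hk] at h2; cases h2
          simp [this]
      simp [this]

-- filtering a nodup-keyed dict's items at key k yields its (truthy) value at k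
lemma pvFilterItems (L : List (String × String)) (hnd : (L.map Prod.fst).Nodup) (k : String) :
    ((L.filter (fun p => p.1 == k && !(p.2 == ""))).map Prod.snd) =
      (if (PySem.Dict.mk L).contains k && !((PySem.Dict.mk L).getD k "" == "") then [(PySem.Dict.mk L).getD k ""] else []) := by
  induction L with
  | nil => simp [PySem.Dict.contains_mk]
  | cons p L ih =>
    simp only [List.map_cons, List.nodup_cons] at hnd
    obtain ⟨hnm, hnd'⟩ := hnd
    have hcont : (PySem.Dict.mk (p :: L)).contains k = ((p.1 == k) || (PySem.Dict.mk L).contains k) := by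
      simp [PySem.Dict.contains_mk]
    have hget : (PySem.Dict.mk (p :: L)).getD k "" =
        (if (p.1 == k) then p.2 else (PySem.Dict.mk L).getD k "") := by
      rw [PySem.Dict.getD_eq_get?_getD]
      rcases p with ⟨k0, v0⟩
      rw [PySem.Dict.get?_mk_cons]
      split
      · rfl
      · rw [← PySem.Dict.getD_eq_get?_getD]
    by_cases hkk : p.1 = k
    · have hb : (p.1 == k) = true := by simp [hkk]
      have hLnone : ∀ q ∈ L, (q.1 == k && !(q.2 == "")) = false := by
        intro q hq
        have : q.1 ≠ k := by
          intro he; apply hnm; rw [hkk, ← he]; exact List.mem_map_of_mem hq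
        simp [this]
      have hfilt : L.filter (fun p => p.1 == k && !(p.2 == "")) = [] :=
        List.filter_eq_nil_iff.mpr (fun q hq => by simp [hLnone q hq])
      simp only [List.filter_cons, hb, hcont, hget, Bool.true_and, Bool.true_or, hfilt]
      by_cases hv : p.2 = ""
      · simp [hv]
      · simp [hv]
    · have hb : (p.1 == k) = false := by simp [hkk]
      simp only [List.filter_cons, hb, Bool.false_and, hcont, hget, Bool.false_or]
      simpa using ih hnd'

-- lift the per-entry result over the whole entries pass
lemma pvEntriesKeys (E : List (PySem.Dict String String)) :
    ∀ t : PySem.Dict String (List String),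
    (E.foldl (fun t e => e.items.foldl pvIStep t) t).keys = t.keys := by
  induction E with
  | nil => intro t; rfl
  | cons e E ih => intro t; simp only [List.foldl_cons, ih, pvIStep_keys]

lemma pvEntriesGetD (E : List (PySem.Dict String String)) :
    ∀ t : PySem.Dict String (List String), ∀ k : String,
    (∀ e ∈ E, e.keys.Nodup) → t.contains k = true →
    (E.foldl (fun t e => e.items.foldl pvIStep t) t).getD k [] =
      t.getD k [] ++
        (E.filter (fun e => e.contains k && !(e.getD k "" == ""))).map (fun e => e.getD k "") := by
  induction E with
  | nil => intro t k _ _; simp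
  | cons e E ih =>
    intro t k hnd hk
    have hk' : (e.items.foldl pvIStep t).contains k = true := by
      rw [pvIStep_contains]; exact hk
    simp only [List.foldl_cons, List.filter_cons]
    rw [ih _ k (fun e he => hnd e (List.mem_cons_of_mem _ he)) hk']
    rw [pvIStep_getD _ _ _ hk]
    have hitems : e.items.map Prod.fst = e.keys := rfl
    have := pvFilterItems e.items (by rw [hitems]; exact hnd e (List.mem_cons_self ..)) k
    have hmk : PySem.Dict.mk e.items = e := rfl
    rw [hmk] at this
    rw [this]
    split
    · simp [List.append_assoc]
    · simp

-- ===== VERDICT (by name: the statement is the Claim_ definition above) =====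
theorem merge_vmr_entries_spec : Claim_equal_merge_vmr_entries := by
  intro vmr_entries _
  unfold Spec_merge_vmr_entries
  match vmr_entries with
  | [] => rfl
  | first :: rest =>
    simp only [merge_vmr_entries, merge_vmr_entries_alt]
    rw [show (fun (t : PySem.Dict String (List String)) (p : String × String) =>
        if !(p.2 == "") && t.contains p.1 then t.modify p.1 [] (fun vs => vs ++ [p.2]) else t) = pvIStep from rfl]
    set E := (first :: rest).map (fun e => PySem.Dict.ofList e) with hE
    set K := (PySem.Dict.ofList first).keys with hK
    have hKnd : K.Nodup := PySem.Dict.nodup_keys_ofList first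
    have hEnd : ∀ e ∈ E, e.keys.Nodup := by
      intro e he
      rw [hE] at he
      rcases List.mem_map.mp he with ⟨raw, _, rfl⟩
      exact PySem.Dict.nodup_keys_ofList raw
    -- A side
    have hA : (K.foldl (fun merged key =>
        merged.insert key (PySem.Str.join "; " (PySem.List.sorted (PySem.Set.ofList
          (E.foldl (fun acc entry =>
            if entry.contains key && !(entry.getD key "" == "") then acc ++ [entry.getD key ""]
            else acc) [])) (fun v => v) false))) PySem.Dict.empty).items =
        K.map (fun k => (k, PySem.Str.join "; " (PySem.List.sorted (PySem.Set.ofList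
          (E.foldl (fun acc entry =>
            if entry.contains k && !(entry.getD k "" == "") then acc ++ [entry.getD k ""]
            else acc) [])) (fun v => v) false))) := by
      have := PySem.Dict.items_foldl_insert_fresh K (fun k => k)
        (fun k => PySem.Str.join "; " (PySem.List.sorted (PySem.Set.ofList
          (E.foldl (fun acc entry =>
            if entry.contains k && !(entry.getD k "" == "") then acc ++ [entry.getD k ""]
            else acc) [])) (fun v => v) false))
        PySem.Dict.empty (by intro a _; simp) (by simpa using hKnd)
      simpa using this
    -- B side: the table
    set table := E.foldl (fun t entry => entry.items.foldl pvIStep t)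
      (K.foldl (fun t k => t.insert k ([] : List String)) PySem.Dict.empty) with htable
    have htable0items : (K.foldl (fun t k => t.insert k ([] : List String)) PySem.Dict.empty).items
        = K.map (fun k => (k, ([] : List String))) := by
      have := PySem.Dict.items_foldl_insert_fresh K (fun k => k)
        (fun _ => ([] : List String)) PySem.Dict.empty (by intro a _; simp) (by simpa using hKnd)
      simpa using this
    have htable0keys : (K.foldl (fun t k => t.insert k ([] : List String)) PySem.Dict.empty).keys = K := by
      show ((K.foldl (fun t k => t.insert k ([] : List String)) PySem.Dict.empty).items.map Prod.fst) = K
      rw [htable0items, List.map_map]; simp [Function.comp_def]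
    have htablekeys : table.keys = K := by
      rw [htable, pvEntriesKeys, htable0keys]
    have htablegetD : ∀ k ∈ K, table.getD k [] =
        (E.filter (fun e => e.contains k && !(e.getD k "" == ""))).map (fun e => e.getD k "") := by
      intro k hkK
      have hc : (K.foldl (fun t k => t.insert k ([] : List String)) PySem.Dict.empty).contains k = true := by
        rw [PySem.Dict.contains_eq_decide_mem_keys, htable0keys]; simpa using hkK
      have h0 : (K.foldl (fun t k => t.insert k ([] : List String)) PySem.Dict.empty).getD k [] = [] := by
        have hmem : (k, ([] : List String)) ∈
            (K.foldl (fun t k => t.insert k ([] : List String)) PySem.Dict.empty).items := by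
          rw [htable0items]; exact List.mem_map_of_mem hkK
        exact PySem.Dict.getD_of_mem_items _ hmem (by rw [show (K.foldl (fun t k => t.insert k ([] : List String)) PySem.Dict.empty).keys = K from htable0keys]; exact hKnd) []
      rw [htable, pvEntriesGetD E _ k hEnd hc, h0, List.nil_append]
    have htableitems : table.items = K.map (fun k => (k, table.getD k [])) := by
      have := PySem.Dict.items_eq_map_keys table (by rw [htablekeys]; exact hKnd) ([] : List String)
      rw [htablekeys] at this; exact this
    -- B side: the finalize pass
    have hres : (table.items.foldl (fun m p =>
        m.insert p.1 (PySem.Str.join "; "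
          (PySem.List.sorted (PySem.Set.ofList p.2) (fun v => v) false))) PySem.Dict.empty).items =
        table.items.map (fun p => (p.1, PySem.Str.join "; "
          (PySem.List.sorted (PySem.Set.ofList p.2) (fun v => v) false))) := by
      have := PySem.Dict.items_foldl_insert_fresh table.items (fun p => p.1)
        (fun p => PySem.Str.join "; " (PySem.List.sorted (PySem.Set.ofList p.2) (fun v => v) false))
        PySem.Dict.empty (by intro a _; simp)
        (by show (table.items.map Prod.fst).Nodup
            rw [show table.items.map Prod.fst = table.keys from rfl, htablekeys]; exact hKnd)
      simpa using this
    rw [hA, hres, htableitems, List.map_map]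
    apply List.map_congr_left
    intro k hkK
    simp only [Function.comp]
    rw [htablegetD k hkK]
    rw [PySem.List.foldl_append_if (fun entry => entry.contains k && !(entry.getD k "" == ""))
      (fun entry => entry.getD k "") E []]
    simp
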